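-- pv_equiv track=rewrite | github.com/BCAA-Algorithm-Study/algorithm-study | exam/kjy/1_programing.py | solution
-- ===== SOURCE A (Python) =====
-- from collections import defaultdict
--
-- def solution(id_list, k):
--
--     id_dict = defaultdict(int)
--
--     for day in id_list:
--         temp = []
--         for id in day.split():
--             if id not in temp:
--                 id_dict[id] +=1
--                 temp.append(id)
--
--     result = 0
--
--     for value in id_dict.values():
--         if value >= k:
--             result += k
--         else:
--             result += value
--
--     return result
-- ===== SOURCE B (Python) =====
-- def solution(id_list, k):
--     flat = sorted(x for day in id_list for x in set(day.split()))
--     result = 0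
--     i = 0
--     n = len(flat)
--     while i < n:
--         j = i + 1
--         while j < n and flat[j] == flat[i]:
--             j += 1
--         result += min(j - i, k)
--         i = j
--     return result
-- ===== Notes on version B (the rewrite author's own statement) =====
-- stated objective: alternative
-- what changed: Replaced the defaultdict count-accumulation (with a per-day temp list membership scan) by flattening the per-day distinct ids, sorting them once, and summing min(run length, k) over consecutive equal runs of the sorted list.
import Mathlib
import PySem

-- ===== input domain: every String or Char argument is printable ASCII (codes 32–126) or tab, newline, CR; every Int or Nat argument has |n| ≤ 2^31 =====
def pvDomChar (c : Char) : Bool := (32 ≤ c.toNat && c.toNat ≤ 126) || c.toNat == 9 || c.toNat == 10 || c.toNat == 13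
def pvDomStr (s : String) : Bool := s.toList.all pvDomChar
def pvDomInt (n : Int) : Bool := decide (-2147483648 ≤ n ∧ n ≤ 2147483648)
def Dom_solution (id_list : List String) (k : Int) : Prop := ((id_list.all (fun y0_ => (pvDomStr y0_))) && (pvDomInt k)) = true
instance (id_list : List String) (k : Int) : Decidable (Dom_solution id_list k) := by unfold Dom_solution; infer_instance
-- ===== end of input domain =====

-- B replaces A's defaultdict count-accumulation by sort-then-sum-over-consecutive-runs; alternative algorithm, same return value.


-- ===== PORT A =====
def solution (id_list : List String) (k : Int) : Int :=
  let id_dict : PySem.Dict String Int :=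
    id_list.foldl (fun d day =>
      ((PySem.Str.split₀ day).foldl
        (fun (st : PySem.Dict String Int × List String) id =>
          if id ∈ st.2 then st else (st.1.modify id 0 (· + 1), st.2 ++ [id]))
        (d, ([] : List String))).1)
      PySem.Dict.empty
  id_dict.values.foldl (fun result value => if value ≥ k then result + k else result + value) 0

-- ===== PORT B =====
-- the inner/outer while loops of Source B: consume one run of equal ids at a time
def runSum (flat : List String) (k : Int) : Int :=
  match flat with
  | [] => 0
  | x :: rest =>
      min (1 + ((rest.takeWhile (· == x)).length : Int)) k
        + runSum (rest.dropWhile (· == x)) k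
termination_by flat.length
decreasing_by
  simp only [List.length_cons]
  exact Nat.lt_succ_of_le (List.length_dropWhile_le _ _)

def solution_alt (id_list : List String) (k : Int) : Int :=
  runSum
    (PySem.List.sorted
      (id_list.flatMap (fun day => PySem.Set.ofList (PySem.Str.split₀ day)))
      (fun x => x) false)
    k

-- ===== PRECONDITION & SPEC =====
def Spec_solution (id_list : List String) (k : Int) (out : Int) : Prop := out = solution_alt id_list k
instance (id_list : List String) (k : Int) (out : Int) : Decidable (Spec_solution id_list k out) := by unfold Spec_solution; infer_instance

-- ===== CLAIM (what is proved, stated in full; the proofs are below) =====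
def Claim_equal_solution : Prop := ∀ (id_list : List String) (k : Int), Dom_solution id_list k → Spec_solution id_list k (solution id_list k)

-- ===== LEMMAS AND PROOFS =====

-- canonical value both sides are reduced to: sum over distinct ids of min(count, k)
def capSum (F : List String) (k : Int) : Int :=
  ((PySem.List.dedup F).map (fun x => min ((F.count x : Int)) k)).sum

theorem capSum_perm (S F : List String) (h : S.Perm F) (k : Int) : capSum S k = capSum F k := by
  unfold capSum
  have hd : (PySem.List.dedup S).Perm (PySem.List.dedup F) :=
    (List.perm_ext_iff_of_nodup (PySem.List.nodup_dedup S) (PySem.List.nodup_dedup F)).mpr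
      (by intro a; simp [h.mem_iff])
  rw [List.map_congr_left (f := fun x => min ((S.count x : Int)) k)
        (g := fun x => min ((F.count x : Int)) k) (by intro x _; simp [h.count_eq])]
  exact (hd.map _).sum_eq

-- Set.add fold helpers
theorem foldl_add_of_subset : ∀ (l s : List String), (∀ y ∈ l, y ∈ s) → l.foldl PySem.Set.add s = s
  | [], _, _ => rfl
  | y :: t, s, h => by
      have hy : y ∈ s := h y (by simp)
      rw [List.foldl_cons, show PySem.Set.add s y = s from by simp [PySem.Set.add, hy]]
      exact foldl_add_of_subset t s (fun z hz => h z (by simp [hz]))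

theorem foldl_add_cons_of_not_mem : ∀ (l : List String) (a : String) (s : List String), a ∉ l →
    l.foldl PySem.Set.add (a :: s) = a :: l.foldl PySem.Set.add s
  | [], _, _, _ => rfl
  | y :: t, a, s, h => by
      have hya : y ≠ a := fun e => h (by simp [e])
      have ht : a ∉ t := fun e => h (by simp [e])
      by_cases hy : y ∈ s
      · rw [List.foldl_cons, List.foldl_cons,
          show PySem.Set.add (a :: s) y = a :: s from by simp [PySem.Set.add, hy],
          show PySem.Set.add s y = s from by simp [PySem.Set.add, hy]]
        exact foldl_add_cons_of_not_mem t a s ht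
      · have hys : y ∉ a :: s := by simp [hya, hy]
        rw [List.foldl_cons, List.foldl_cons,
          show PySem.Set.add (a :: s) y = a :: (s ++ [y]) from by simp [PySem.Set.add, hys],
          show PySem.Set.add s y = s ++ [y] from by simp [PySem.Set.add, hy]]
        exact foldl_add_cons_of_not_mem t a (s ++ [y]) ht

theorem dedup_run (x : String) (l1 l2 : List String) (h1 : ∀ y ∈ l1, y ∈ [x]) (h2 : x ∉ l2) :
    PySem.List.dedup (x :: (l1 ++ l2)) = x :: PySem.List.dedup l2 := by
  have hd : ∀ l : List String, PySem.List.dedup l = l.foldl PySem.Set.add [] := fun l => by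
    simp [PySem.List.dedup_eq_ofList, PySem.Set.ofList_eq_foldl]
  rw [hd, hd, List.foldl_cons,
    show PySem.Set.add [] x = [x] from by simp [PySem.Set.add],
    List.foldl_append, foldl_add_of_subset l1 [x] h1]
  exact foldl_add_cons_of_not_mem l2 x [] h2

theorem not_mem_dropWhile_beq : ∀ (rest : List String) (x : String),
    (∀ y ∈ rest, x ≤ y) → rest.Pairwise (· ≤ ·) → x ∉ rest.dropWhile (· == x)
  | [], _, _, _ => by simp
  | a :: t, x, hle, hp => by
      rw [List.dropWhile_cons]
      by_cases ha : a = x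
      · simp only [ha, beq_self_eq_true, if_true]
        exact not_mem_dropWhile_beq t x (fun y hy => hle y (List.mem_cons_of_mem _ hy))
          (List.Pairwise.of_cons hp)
      · have hb : ((a == x) : Bool) = false := beq_eq_false_iff_ne.mpr ha
        simp only [hb, Bool.false_eq_true, if_false]
        intro hmem
        rcases List.mem_cons.1 hmem with he | hm
        · exact ha he.symm
        · exact ha (le_antisymm ((List.pairwise_cons.1 hp).1 x hm) (hle a (by simp)))

-- the ids A's inner day-loop actually counts: those not already in temp, in order
def newElems (s : List String) : List String → List String
  | [] => []
  | x :: t => if x ∈ s then newElems s t else x :: newElems (s ++ [x]) t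

theorem inner_eq : ∀ (ids : List String) (d : PySem.Dict String Int) (s : List String),
    ids.foldl (fun st id => if id ∈ st.2 then st else (st.1.modify id 0 (· + 1), st.2 ++ [id])) (d, s)
      = ((newElems s ids).foldl (fun d x => d.modify x 0 (· + 1)) d, s ++ newElems s ids)
  | [], d, s => by simp [newElems]
  | x :: t, d, s => by
      by_cases hx : x ∈ s
      · simp only [List.foldl_cons, newElems, if_pos hx]
        exact inner_eq t d s
      · simp only [List.foldl_cons, newElems, if_neg hx]
        rw [inner_eq t _ (s ++ [x])]
        exact Prod.ext rfl (by simp)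

theorem append_newElems : ∀ (ids s : List String), s ++ newElems s ids = ids.foldl PySem.Set.add s
  | [], s => by simp [newElems]
  | x :: t, s => by
      by_cases hx : x ∈ s
      · rw [show newElems s (x :: t) = newElems s t from by simp [newElems, hx], List.foldl_cons,
          show PySem.Set.add s x = s from by simp [PySem.Set.add, hx]]
        exact append_newElems t s
      · rw [show newElems s (x :: t) = x :: newElems (s ++ [x]) t from by simp [newElems, hx],
          List.foldl_cons,
          show PySem.Set.add s x = s ++ [x] from by simp [PySem.Set.add, hx],
          ← append_newElems t (s ++ [x]), List.append_cons]

theorem newElems_nil (ids : List String) : newElems [] ids = PySem.List.dedup ids := by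
  have h := append_newElems ids []
  simpa [PySem.List.dedup_eq_ofList, PySem.Set.ofList_eq_foldl] using h

theorem solution_eq_capSum (id_list : List String) (k : Int) :
    solution id_list k
      = capSum (id_list.flatMap (fun day => PySem.Set.ofList (PySem.Str.split₀ day))) k := by
  have h1 : (fun (d : PySem.Dict String Int) (day : String) =>
      ((PySem.Str.split₀ day).foldl
        (fun (st : PySem.Dict String Int × List String) id =>
          if id ∈ st.2 then st else (st.1.modify id 0 (· + 1), st.2 ++ [id]))
        (d, ([] : List String))).1)
      = fun d day => (PySem.Set.ofList (PySem.Str.split₀ day)).foldl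
          (fun d x => d.modify x 0 (· + 1)) d := by
    funext d day
    rw [inner_eq]
    simp [newElems_nil, PySem.List.dedup_eq_ofList]
  have h2 : PySem.Dict.counter (id_list.flatMap (fun day => PySem.Set.ofList (PySem.Str.split₀ day)))
      = id_list.foldl (fun d day => (PySem.Set.ofList (PySem.Str.split₀ day)).foldl
          (fun d x => d.modify x 0 (· + 1)) d) PySem.Dict.empty := by
    rw [PySem.Dict.counter_eq_foldl, List.foldl_flatMap]
  unfold solution
  rw [h1, ← h2]
  show (PySem.Dict.counter (id_list.flatMap (fun day => PySem.Set.ofList (PySem.Str.split₀ day)))).values.foldl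
      (fun result value => if value ≥ k then result + k else result + value) 0
    = capSum (id_list.flatMap (fun day => PySem.Set.ofList (PySem.Str.split₀ day))) k
  have hvals : (PySem.Dict.counter (id_list.flatMap (fun day => PySem.Set.ofList (PySem.Str.split₀ day)))).values
      = (PySem.Set.ofList (id_list.flatMap (fun day => PySem.Set.ofList (PySem.Str.split₀ day)))).map
          (fun x => (((id_list.flatMap (fun day => PySem.Set.ofList (PySem.Str.split₀ day))).count x) : Int)) := by
    simp only [PySem.Dict.values, PySem.Dict.items_counter, List.map_map]
    rfl
  rw [hvals]
  rw [show (fun (result value : Int) => if value ≥ k then result + k else result + value)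
      = fun result value => result + min value k from by
    funext r v; split_ifs <;> omega]
  rw [PySem.List.foldl_add (g := fun v => min v k)]
  simp [capSum, PySem.List.dedup_eq_ofList, List.map_map]
  try rfl

theorem runSum_eq_capSum_len : ∀ (n : Nat) (S : List String), S.length ≤ n →
    ∀ k : Int, S.Pairwise (· ≤ ·) → runSum S k = capSum S k
  | _, [], _, k, _ => by simp [runSum, capSum]
  | 0, x :: rest, h, _, _ => by simp at h
  | n + 1, x :: rest, hlen, k, hp => by
      have hrest : rest.Pairwise (· ≤ ·) := List.Pairwise.of_cons hp
      have hle : ∀ y ∈ rest, x ≤ y := (List.pairwise_cons.1 hp).1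
      have hsplit : rest.takeWhile (· == x) ++ rest.dropWhile (· == x) = rest :=
        List.takeWhile_append_dropWhile
      have hmem_same : ∀ y ∈ rest.takeWhile (· == x), y ∈ [x] := by
        intro y hy
        have hb := List.mem_takeWhile_imp hy
        simp only [List.mem_singleton]
        exact eq_of_beq hb
      have hxnot : x ∉ rest.dropWhile (· == x) := not_mem_dropWhile_beq rest x hle hrest
      have hp' : (rest.dropWhile (· == x)).Pairwise (· ≤ ·) :=
        List.Pairwise.sublist (List.dropWhile_sublist _) hrest
      have hlen' : (rest.dropWhile (· == x)).length ≤ n := by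
        have h1 := List.length_dropWhile_le (· == x) rest
        have h2 : rest.length ≤ n := by simpa using Nat.le_of_succ_le_succ (by simpa using hlen)
        omega
      have ihr := runSum_eq_capSum_len n (rest.dropWhile (· == x)) hlen' k hp'
      rw [runSum, ihr]
      -- now compute capSum (x :: rest)
      have hS : x :: rest = x :: (rest.takeWhile (· == x) ++ rest.dropWhile (· == x)) := by
        rw [hsplit]
      have hded := dedup_run x (rest.takeWhile (· == x)) (rest.dropWhile (· == x)) hmem_same hxnot
      have hcx : ((x :: rest).count x : Int) = 1 + ((rest.takeWhile (· == x)).length : Int) := by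
        have h1 : (rest.takeWhile (· == x)).count x = (rest.takeWhile (· == x)).length :=
          List.count_eq_length.mpr (fun b hb => (List.mem_singleton.mp (hmem_same b hb)).symm)
        have h2 : (rest.dropWhile (· == x)).count x = 0 := List.count_eq_zero.mpr hxnot
        rw [show (x :: rest).count x = rest.count x + 1 from List.count_cons_self]
        rw [show rest.count x = (rest.takeWhile (· == x)).count x + (rest.dropWhile (· == x)).count x from by
          conv_lhs => rw [← hsplit]
          exact List.count_append ..]
        rw [h1, h2]
        push_cast
        ring
      have hcy : ∀ y ∈ PySem.List.dedup (rest.dropWhile (· == x)),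
          ((x :: rest).count y : Int) = ((rest.dropWhile (· == x)).count y : Int) := by
        intro y hy
        have hyr : y ∈ rest.dropWhile (· == x) := (PySem.List.mem_dedup ..).mp hy
        have hyx : y ≠ x := fun e => hxnot (e ▸ hyr)
        have h1 : (rest.takeWhile (· == x)).count y = 0 :=
          List.count_eq_zero.mpr (fun hmem => hyx (by simpa using hmem_same y hmem))
        rw [show (x :: rest).count y = rest.count y from List.count_cons_of_ne (Ne.symm hyx)]
        rw [show rest.count y = (rest.takeWhile (· == x)).count y + (rest.dropWhile (· == x)).count y from by
          conv_lhs => rw [← hsplit]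
          exact List.count_append ..]
        rw [h1]
        push_cast
        ring
      unfold capSum
      conv_rhs => rw [hS, hded]
      rw [List.map_cons, List.sum_cons]
      rw [← hS, hcx]
      have hmap := List.map_congr_left
        (l := PySem.List.dedup (rest.dropWhile (· == x)))
        (f := fun y => min ((List.count y (x :: rest) : Int)) k)
        (g := fun y => min ((List.count y (rest.dropWhile (· == x)) : Int)) k)
        (fun y hy => by simp [hcy y hy])
      rw [hmap]

-- ===== VERDICT (by name: the statement is the Claim_ definition above) =====
theorem solution_spec : Claim_equal_solution := by
  intro id_list k _
  unfold Spec_solution solution_alt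
  rw [solution_eq_capSum, runSum_eq_capSum_len _ _ le_rfl k (by simpa using PySem.List.sorted_pairwise (xs := id_list.flatMap (fun day => PySem.Set.ofList (PySem.Str.split₀ day))) (key := fun x : String => x))]
  exact (capSum_perm _ _ (PySem.List.sorted_perm _ _ _) k).symm
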